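-- pv_equiv track=rewrite | github.com/KALALIZ/PythonCode | Term1/Lab09/Lab09_5_610510670.py | three_digits_to_word
-- ===== SOURCE A (Python) =====
-- def three_digits_to_word(n):
--
--     unit_list_ = ["", "one", "two", "three", "four", "five", "six", "seven", "eight", "nine", "ten", "eleven", "twelve", "thirteen", "fourteen", "fifteen", "sixteen", "seventeen", "eighteen", "nineteen"]
--     long_list_ = len(unit_list_)
--     ten_list_ = ["", "ten", "twenty", "thirty", "forty", "fifty", "sixty", "seventy", "eighty", "ninety"]
--
--     if n < long_list_:
--         return unit_list_[n]
--
--     pos = 0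
--     k = n
--     while k > 0:
--         k = k // 10
--         pos += 1
--
--     number_ = ''
--
--     if pos == 2:
--         (a,b) = divmod(n,10)
--         if b == 0:
--             number_ = ten_list_[a]
--         else:
--             number_ = ten_list_[a] + "-" + unit_list_[b]
--
--     elif pos == 3:
--         (a,b) = divmod(n,100)
--         (c,d) = divmod(b,10)
--
--         if b == 11:
--             number_ = unit_list_[a] + " " + "hundred" + " " + unit_list_[b]
--         elif 11 < b < 20:
--             number_ = unit_list_[a] + " " + "hundred" + " " + unit_list_[b]
--         elif c == 0:
--             number_ = unit_list_[a] + " " + "hundred" + " " + unit_list_[d]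
--         elif d == 0:
--             number_ = unit_list_[a] + " " + "hundred" + " " + ten_list_[c]
--         else:
--             number_ = unit_list_[a] + " " + "hundred" + " " + ten_list_[c] + "-" + unit_list_[d]
--
--     return number_
-- ===== SOURCE B (Python) =====
-- UNITS = ["", "one", "two", "three", "four", "five", "six", "seven", "eight", "nine",
--          "ten", "eleven", "twelve", "thirteen", "fourteen", "fifteen", "sixteen",
--          "seventeen", "eighteen", "nineteen"]
-- TENS = ["", "ten", "twenty", "thirty", "forty", "fifty", "sixty", "seventy", "eighty", "ninety"]
--
-- # The whole answer table 0..999, built once by composing the word lists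
-- # (no per-call digit arithmetic): 0..99, then each hundreds block.
-- UNDER100 = UNITS + [t + ("-" + u if u else "") for t in TENS[2:] for u in UNITS[:10]]
-- WORDS = UNDER100 + [h + " hundred " + x for h in UNITS[1:10] for x in UNDER100]
--
--
-- def three_digits_to_word(n):
--     return WORDS[n] if 0 <= n < 1000 else ""
-- ===== Notes on version B (the rewrite author's own statement) =====
-- stated objective: alternative
-- what changed: Replaces A's per-call digit-counting loop and five-branch divmod logic by a precomputed 1000-entry answer table built once from the word lists by comprehensions; the function is a bounds check plus one table lookup.
-- intended difference: On the negative inputs -19..-1, A returns a word picked by accidental negative-index wraparound (e.g. 'nineteen' for -1), while B returns '' as it does for every other out-of-range input, which is the intended value. — e.g. on three_digits_to_word(-1): A returns "nineteen", B returns ""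
-- outside the precondition, e.g. on three_digits_to_word(-21): A raises IndexError, B returns ''
import Mathlib
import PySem

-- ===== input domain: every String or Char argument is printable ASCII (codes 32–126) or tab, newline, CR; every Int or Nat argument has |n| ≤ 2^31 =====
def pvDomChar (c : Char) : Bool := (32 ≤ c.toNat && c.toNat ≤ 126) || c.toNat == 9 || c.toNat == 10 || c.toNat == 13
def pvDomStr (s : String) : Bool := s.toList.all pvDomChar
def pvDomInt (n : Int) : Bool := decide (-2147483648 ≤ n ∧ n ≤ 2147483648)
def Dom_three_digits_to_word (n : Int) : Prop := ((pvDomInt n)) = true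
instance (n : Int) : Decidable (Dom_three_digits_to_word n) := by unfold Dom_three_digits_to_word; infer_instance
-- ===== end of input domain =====

-- B replaces A's digit-counting loop and branch logic by a 1000-entry answer table
-- built once from the word lists; the call is a bounds check plus a lookup (objective: alternative).

-- ===== PORT A =====
-- The two word tables (module literals in both Pythons).
def pvUnits : List String :=
  ["", "one", "two", "three", "four", "five", "six", "seven", "eight", "nine",
   "ten", "eleven", "twelve", "thirteen", "fourteen", "fifteen", "sixteen",
   "seventeen", "eighteen", "nineteen"]
def pvTens : List String :=
  ["", "ten", "twenty", "thirty", "forty", "fifty", "sixty", "seventy", "eighty", "ninety"]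

-- xs[i] (Python semantics, incl. negative wraparound); total form: the `none` case
-- (IndexError, i.e. n ≤ -21 in A) is excluded by Pre_three_digits_to_word.
def pvIdx (xs : List String) (i : Int) : String := (PySem.List.pyGet? xs i).getD ""

-- A's `while k > 0: k = k // 10; pos += 1` digit-counting loop.
def pvPos (k : Int) (pos : Int) : Int :=
  if 0 < k then pvPos (PySem.Int.floordiv k 10) (pos + 1) else pos
termination_by k.toNat
decreasing_by
  rw [PySem.Int.floordiv_eq_ediv_of_pos (by norm_num)]
  omega

def three_digits_to_word (n : Int) : String :=
  let unit_list_ := pvUnits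
  let long_list_ : Int := (unit_list_.length : Int)
  let ten_list_ := pvTens
  if n < long_list_ then pvIdx unit_list_ n
  else
    let pos := pvPos n 0
    if pos = 2 then
      -- divmod(n, 10); divisor is the nonzero literal 10, so divmod is total here
      let a := PySem.Int.floordiv n 10
      let b := PySem.Int.mod n 10
      if b = 0 then pvIdx ten_list_ a
      else pvIdx ten_list_ a ++ "-" ++ pvIdx unit_list_ b
    else if pos = 3 then
      let a := PySem.Int.floordiv n 100
      let b := PySem.Int.mod n 100
      let c := PySem.Int.floordiv b 10
      let d := PySem.Int.mod b 10
      if b = 11 then pvIdx unit_list_ a ++ " " ++ "hundred" ++ " " ++ pvIdx unit_list_ b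
      else if 11 < b ∧ b < 20 then pvIdx unit_list_ a ++ " " ++ "hundred" ++ " " ++ pvIdx unit_list_ b
      else if c = 0 then pvIdx unit_list_ a ++ " " ++ "hundred" ++ " " ++ pvIdx unit_list_ d
      else if d = 0 then pvIdx unit_list_ a ++ " " ++ "hundred" ++ " " ++ pvIdx ten_list_ c
      else pvIdx unit_list_ a ++ " " ++ "hundred" ++ " " ++ pvIdx ten_list_ c ++ "-" ++ pvIdx unit_list_ d
    else ""

-- ===== PORT B =====
-- UNDER100 = UNITS + [t + ("-" + u if u else "") for t in TENS[2:] for u in UNITS[:10]]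
def pvUnder100 : List String :=
  pvUnits ++ (PySem.List.slice pvTens (some 2) none).flatMap
    (fun t => (PySem.List.slice pvUnits none (some 10)).map
      (fun u => t ++ (if u ≠ "" then "-" ++ u else "")))

-- WORDS = UNDER100 + [h + " hundred " + x for h in UNITS[1:10] for x in UNDER100]
def pvWords : List String :=
  pvUnder100 ++ (PySem.List.slice pvUnits (some 1) (some 10)).flatMap
    (fun h => pvUnder100.map (fun x => h ++ " hundred " ++ x))

def three_digits_to_word_alt (n : Int) : String :=
  if 0 ≤ n ∧ n < 1000 then pvIdx pvWords n else ""

-- ===== PRECONDITION & SPEC =====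
-- Pre_ excludes exactly n ≤ -21, where A raises IndexError (unit_list_[n] out of range).
def Pre_three_digits_to_word (n : Int) : Prop := -20 ≤ n
instance (n : Int) : Decidable (Pre_three_digits_to_word n) := by unfold Pre_three_digits_to_word; infer_instance
def pvWitness_three_digits_to_word : Int := (123)

-- On the negative inputs -19..-1, A returns a word picked by accidental negative-index
-- wraparound (e.g. "nineteen" for -1); B returns "" as for every other out-of-range
-- input, the intended value.
def D_three_digits_to_word (n : Int) : Prop := -19 ≤ n ∧ n ≤ -1
instance (n : Int) : Decidable (D_three_digits_to_word n) := by unfold D_three_digits_to_word; infer_instance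

def Spec_three_digits_to_word (n : Int) (out : String) : Prop := ¬ D_three_digits_to_word n → out = three_digits_to_word_alt n
instance (n : Int) (out : String) : Decidable (Spec_three_digits_to_word n out) := by unfold Spec_three_digits_to_word; infer_instance

def pvDiffWitness_three_digits_to_word : Int := (-1)
def pvDiffWitnessOut_three_digits_to_word : String × String := ("nineteen", "")

-- ===== CLAIM (what is proved, stated in full; the proofs are below) =====
def Claim_unchanged_three_digits_to_word : Prop := ∀ (n : Int), Dom_three_digits_to_word n → Pre_three_digits_to_word n → Spec_three_digits_to_word n (three_digits_to_word n)
def Claim_changed_three_digits_to_word : Prop := Dom_three_digits_to_word (pvDiffWitness_three_digits_to_word) ∧ Pre_three_digits_to_word (pvDiffWitness_three_digits_to_word) ∧ D_three_digits_to_word (pvDiffWitness_three_digits_to_word) ∧ three_digits_to_word (pvDiffWitness_three_digits_to_word) = pvDiffWitnessOut_three_digits_to_word.1 ∧ three_digits_to_word_alt (pvDiffWitness_three_digits_to_word) = pvDiffWitnessOut_three_digits_to_word.2 ∧ pvDiffWitnessOut_three_digits_to_word.1 ≠ pvDiffWitnessOut_three_digits_to_word.2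
def Claim_exact_three_digits_to_word : Prop := ∀ (n : Int), Dom_three_digits_to_word n → Pre_three_digits_to_word n → D_three_digits_to_word n → three_digits_to_word n ≠ three_digits_to_word_alt n

-- ===== LEMMAS AND PROOFS =====

-- proof-side closed forms of the table entries (Int arithmetic, ediv/emod)
def pvW2I (x : Int) : String :=
  if x < 20 then pvIdx pvUnits x
  else pvIdx pvTens (x / 10) ++ (if x % 10 ≠ 0 then "-" ++ pvIdx pvUnits (x % 10) else "")

def pvWFullI (x : Int) : String :=
  if x < 100 then pvW2I x
  else pvIdx pvUnits (x / 100) ++ " hundred " ++ pvW2I (x % 100)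

-- B's table is pointwise the closed form (one finite kernel computation).
set_option maxHeartbeats 4000000 in
set_option maxRecDepth 10000 in
theorem pvWords_eq : pvWords = (List.range 1000).map (fun (i : Nat) => pvWFullI (Int.ofNat i)) := by decide

lemma getD_map_range {α : Type} (f : Nat → α) (N m : Nat) (h : m < N) (d : α) :
    ((List.range N).map f).getD m d = f m := by
  simp [List.getD, h]

lemma pvIdx_natCast (xs : List String) (m : Nat) : pvIdx xs (m : Int) = xs.getD m "" := by
  simp [pvIdx, PySem.List.pyGet?_natCast, List.getD]

lemma alt_closed (n : Int) (h0 : 0 ≤ n) (h1 : n < 1000) :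
    three_digits_to_word_alt n = pvWFullI n := by
  obtain ⟨m, rfl⟩ := Int.eq_ofNat_of_zero_le h0
  have hm : m < 1000 := by exact_mod_cast h1
  unfold three_digits_to_word_alt
  rw [if_pos ⟨h0, h1⟩, pvIdx_natCast, pvWords_eq, getD_map_range _ _ _ hm]
  rfl

lemma pvPos_ge (k p : Int) : p ≤ pvPos k p := by
  induction k, p using pvPos.induct with
  | case1 k p hk ih => rw [pvPos, if_pos hk]; omega
  | case2 k p hk => rw [pvPos, if_neg hk]

lemma pvPos_nonpos (k p : Int) (h : ¬ 0 < k) : pvPos k p = p := by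
  rw [pvPos, if_neg h]

lemma pvPos_two (n : Int) (h1 : 20 ≤ n) (h2 : n ≤ 99) : pvPos n 0 = 2 := by
  rw [pvPos, if_pos (by omega), PySem.Int.floordiv_eq_ediv_of_pos (by norm_num)]
  rw [pvPos, if_pos (by omega), PySem.Int.floordiv_eq_ediv_of_pos (by norm_num)]
  exact pvPos_nonpos _ _ (by omega)

lemma pvPos_three (n : Int) (h1 : 100 ≤ n) (h2 : n ≤ 999) : pvPos n 0 = 3 := by
  rw [pvPos, if_pos (by omega), PySem.Int.floordiv_eq_ediv_of_pos (by norm_num)]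
  rw [pvPos, if_pos (by omega), PySem.Int.floordiv_eq_ediv_of_pos (by norm_num)]
  rw [pvPos, if_pos (by omega), PySem.Int.floordiv_eq_ediv_of_pos (by norm_num)]
  exact pvPos_nonpos _ _ (by omega)

lemma pvPos_big (n : Int) (h : 1000 ≤ n) : 4 ≤ pvPos n 0 := by
  rw [pvPos, if_pos (by omega), PySem.Int.floordiv_eq_ediv_of_pos (by norm_num)]
  rw [pvPos, if_pos (by omega), PySem.Int.floordiv_eq_ediv_of_pos (by norm_num)]
  rw [pvPos, if_pos (by omega), PySem.Int.floordiv_eq_ediv_of_pos (by norm_num)]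
  rw [pvPos, if_pos (by omega), PySem.Int.floordiv_eq_ediv_of_pos (by norm_num)]
  have := pvPos_ge (n / 10 / 10 / 10 / 10) (0 + 1 + 1 + 1 + 1)
  omega

-- A's "hundred" prefix re-associated to B's single literal
lemma hundred_assoc (s t : String) :
    s ++ " " ++ "hundred" ++ " " ++ t = s ++ " hundred " ++ t := by
  simp [String.append_assoc]

set_option maxHeartbeats 1000000 in
theorem A_eq_closed (n : Int) (h0 : 0 ≤ n) (h1 : n < 1000) :
    three_digits_to_word n = pvWFullI n := by
  have hlen : ((pvUnits.length : Nat) : Int) = 20 := by decide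
  have h10 : (0:Int) < 10 := by norm_num
  have h100 : (0:Int) < 100 := by norm_num
  rcases (by omega : (0 ≤ n ∧ n ≤ 19) ∨ (20 ≤ n ∧ n ≤ 99) ∨ (100 ≤ n ∧ n ≤ 999)) with h | h | h
  · -- 0 ≤ n ≤ 19: both return units[n]
    simp only [three_digits_to_word, pvWFullI, pvW2I]
    rw [hlen]
    split_ifs <;> first | rfl | omega
  · -- 20 ≤ n ≤ 99
    obtain ⟨ha, hb⟩ := h
    simp only [three_digits_to_word, pvWFullI, pvW2I]
    rw [hlen, pvPos_two n ha hb]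
    simp only [PySem.Int.floordiv_eq_ediv_of_pos h10, PySem.Int.mod_eq_emod_of_pos h10]
    split_ifs <;> first | omega | simp [String.append_assoc]
  · -- 100 ≤ n ≤ 999
    obtain ⟨ha, hb⟩ := h
    simp only [three_digits_to_word, pvWFullI, pvW2I]
    rw [hlen, pvPos_three n ha hb]
    simp only [PySem.Int.floordiv_eq_ediv_of_pos h10, PySem.Int.mod_eq_emod_of_pos h10,
               PySem.Int.floordiv_eq_ediv_of_pos h100, PySem.Int.mod_eq_emod_of_pos h100]
    split_ifs <;>
      first
        | omega
        | (rw [hundred_assoc]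
           first
             | rfl
             | rw [show n % 100 % 10 = n % 100 by omega]
             | rw [show n % 100 = 10 by omega,
                   show pvIdx pvTens ((10:Int)/10) = pvIdx pvUnits 10 from by decide]
             | (simp; done)
             | simp [String.append_assoc])
        | simp [String.append_assoc]

-- ===== VERDICT (by name: the statement is the Claim_ definition above) =====
theorem three_digits_to_word_spec : Claim_unchanged_three_digits_to_word := by
  intro n _ hPre hD
  rcases (by unfold Pre_three_digits_to_word at hPre; unfold D_three_digits_to_word at hD; omega :
      n = -20 ∨ (0 ≤ n ∧ n < 1000) ∨ 1000 ≤ n) with h | h | h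
  · subst h; decide
  · rw [A_eq_closed n h.1 h.2, alt_closed n h.1 h.2]
  · -- n ≥ 1000: both return ""
    simp only [three_digits_to_word, three_digits_to_word_alt]
    have h4 := pvPos_big n h
    rw [show ((pvUnits.length : Nat) : Int) = 20 by decide]
    generalize hp : pvPos n 0 = p at h4 ⊢
    split_ifs <;> first | omega | rfl

theorem three_digits_to_word_changed : Claim_changed_three_digits_to_word := by
  unfold Claim_changed_three_digits_to_word; decide

theorem three_digits_to_word_tight : Claim_exact_three_digits_to_word := by
  unfold Claim_exact_three_digits_to_word
  intro n _ _ hDn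
  obtain ⟨h1, h2⟩ := hDn
  interval_cases n <;> decide
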